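-- pv_equiv track=rewrite | github.com/HarrySu123/graph-eval | evaluation_function/algorithms/bipartite.py | _reconstruct_odd_cycle
-- ===== SOURCE A (Python) =====
-- def _reconstruct_odd_cycle(u: str, v: str, parent: dict[str, str], depth: dict[str, int]) -> list[str]:
--     # Build paths to root
--     pu = [u]
--     pv = [v]
--     cu, cv = u, v
--     while cu in parent:
--         cu = parent[cu]
--         pu.append(cu)
--     while cv in parent:
--         cv = parent[cv]
--         pv.append(cv)
--
--     set_pu = {x: i for i, x in enumerate(pu)}
--     lca = None
--     j = None
--     for idx, node in enumerate(pv):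
--         if node in set_pu:
--             lca = node
--             j = idx
--             break
--
--     if lca is None or j is None:
--         # Fallback: just return the triangle-ish evidence
--         return [u, v, u]
--
--     i = set_pu[lca]
--     path_u_to_lca = pu[: i + 1]  # u..lca
--     path_v_to_lca = pv[: j + 1]  # v..lca
--     path_v_to_lca.reverse()  # lca..v
--
--     cycle = path_u_to_lca + path_v_to_lca[1:] + [u]
--     return cycle
-- ===== SOURCE B (Python) =====
-- def _reconstruct_odd_cycle(u: str, v: str, parent: dict[str, str], depth: dict[str, int]) -> list[str]:
--     # Align the two root paths at the root and strip their longest common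
--     # suffix; since parent is a function, the two paths coincide exactly from
--     # the LCA on, so the stripped suffix's first element IS the LCA: no hash
--     # set and no membership scan at all.
--     pu = [u]
--     while pu[-1] in parent:
--         pu.append(parent[pu[-1]])
--     pv = [v]
--     while pv[-1] in parent:
--         pv.append(parent[pv[-1]])
--     k = 0
--     for a, b in zip(reversed(pu), reversed(pv)):
--         if a != b:
--             break
--         k += 1
--     if k == 0:
--         return [u, v, u]
--     return pu[: len(pu) - k + 1] + pv[: len(pv) - k][::-1] + [u]
-- ===== Notes on version B (the rewrite author's own statement) =====
-- stated objective: alternative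
-- what changed: A builds both root paths, hashes u's path into an index dict and scans v's path for the first indexed node (the LCA); B drops the hash set and the scan entirely: it aligns the two root paths at the root and strips their longest common suffix (parent is a function, so the paths coincide exactly from the LCA on), splicing the cycle at the suffix boundary.
import Mathlib
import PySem

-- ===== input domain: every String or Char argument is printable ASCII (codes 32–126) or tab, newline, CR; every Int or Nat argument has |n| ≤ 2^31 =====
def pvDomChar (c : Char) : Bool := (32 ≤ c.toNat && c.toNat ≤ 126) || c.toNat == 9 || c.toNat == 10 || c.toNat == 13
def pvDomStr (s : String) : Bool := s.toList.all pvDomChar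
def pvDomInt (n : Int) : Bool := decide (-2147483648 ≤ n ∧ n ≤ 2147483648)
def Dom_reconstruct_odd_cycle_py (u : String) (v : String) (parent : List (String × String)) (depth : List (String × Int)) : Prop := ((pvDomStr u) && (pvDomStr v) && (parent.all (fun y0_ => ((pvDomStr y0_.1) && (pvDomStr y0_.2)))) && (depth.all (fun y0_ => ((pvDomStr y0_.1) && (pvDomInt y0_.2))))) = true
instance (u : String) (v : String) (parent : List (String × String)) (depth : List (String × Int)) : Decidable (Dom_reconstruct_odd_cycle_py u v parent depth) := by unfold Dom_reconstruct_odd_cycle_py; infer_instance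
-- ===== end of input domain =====

-- B drops A's hash-set/LCA-scan machinery entirely: it aligns the two root paths at the
-- root and strips their longest common suffix; since parent is a function the paths
-- coincide exactly from the LCA on, so the stripped suffix starts at the LCA.
-- The Lean ports totalise the Python while-loops with fuel parent.length + 1, which no
-- terminating walk exhausts (a terminating walk passes through pairwise-distinct keys,
-- so it takes at most parent.length steps): where the fuel runs out Python diverges and
-- never returns, and both ports return the same designated value [] there.

-- ===== PORT A =====
-- 'while cu in parent: cu = parent[cu]; pu.append(cu)' — fueled structural recursion
-- (none = fuel exhausted = the Python loop never terminates)
def pvAWalk (parent : List (String × String)) : Nat → String → List String → Option (List String)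
  | 0, _, _ => none
  | fuel + 1, cu, acc =>
    match parent.lookup cu with
    | some p => pvAWalk parent fuel p (acc ++ [p])
    | none => some acc

-- 'for idx, node in enumerate(pv): if node in set_pu: … break' — first hit or none
def pvAScan (d : PySem.Dict String Int) : List (Int × String) → Option (String × Int)
  | [] => none
  | (idx, node) :: rest => if d.contains node then some (node, idx) else pvAScan d rest

def reconstruct_odd_cycle_py (u : String) (v : String) (parent : List (String × String)) (depth : List (String × Int)) : List String :=
  match pvAWalk parent (parent.length + 1) u [u], pvAWalk parent (parent.length + 1) v [v] with
  | none, _ => []  -- unreachable where Python returns: its loop diverges here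
  | _, none => []  -- unreachable where Python returns: its loop diverges here
  | some pu, some pv =>
  let set_pu : PySem.Dict String Int :=
    (PySem.List.enumerate pu 0).foldl (fun d p => d.insert p.2 p.1) PySem.Dict.empty
  match pvAScan set_pu (PySem.List.enumerate pv 0) with
  | none => [u, v, u]
  | some (lca, j) =>
    let i := set_pu.getD lca 0
    let path_u_to_lca := PySem.List.slice pu none (some (i + 1))
    let path_v_to_lca := (PySem.List.slice pv none (some (j + 1))).reverse
    path_u_to_lca ++ PySem.List.slice path_v_to_lca (some 1) none ++ [u]

-- ===== PORT B =====
-- Source B's walk loops: 'while pu[-1] in parent: pu.append(parent[pu[-1]])', fueled;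
-- pu[-1] is PySem.List.pyGetD acc (-1) (acc is never empty: it starts as [u])
def pvBWalk (parent : List (String × String)) : Nat → List String → Option (List String)
  | 0, _ => none
  | fuel + 1, acc =>
    match parent.lookup (PySem.List.pyGetD acc (-1) "") with
    | some p => pvBWalk parent fuel (acc ++ [p])
    | none => some acc

-- Source B's 'for a, b in zip(reversed(pu), reversed(pv)): if a != b: break; k += 1'
def pvBCpl : List String → List String → Nat
  | a :: xs, b :: ys => if a = b then pvBCpl xs ys + 1 else 0
  | _, _ => 0

-- 'pv[:len(pv)-k][::-1]' is ported slice-then-.reverse (exact: PySem.List.slice?_none_none_neg_one)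
def reconstruct_odd_cycle_py_alt (u : String) (v : String) (parent : List (String × String)) (depth : List (String × Int)) : List String :=
  match pvBWalk parent (parent.length + 1) [u], pvBWalk parent (parent.length + 1) [v] with
  | none, _ => []  -- unreachable where Python returns: its loop diverges here
  | _, none => []  -- unreachable where Python returns: its loop diverges here
  | some pu, some pv =>
  let k := pvBCpl pu.reverse pv.reverse
  if k = 0 then [u, v, u]
  else
    PySem.List.slice pu none (some ((pu.length : Int) - (k : Int) + 1)) ++
      (PySem.List.slice pv none (some ((pv.length : Int) - (k : Int)))).reverse ++ [u]

-- ===== PRECONDITION & SPEC =====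
def Spec_reconstruct_odd_cycle_py (u : String) (v : String) (parent : List (String × String)) (depth : List (String × Int)) (out : List String) : Prop := out = reconstruct_odd_cycle_py_alt u v parent depth
instance (u : String) (v : String) (parent : List (String × String)) (depth : List (String × Int)) (out : List String) : Decidable (Spec_reconstruct_odd_cycle_py u v parent depth out) := by unfold Spec_reconstruct_odd_cycle_py; infer_instance

-- ===== CLAIM (what is proved, stated in full; the proofs are below) =====
def Claim_equal_reconstruct_odd_cycle_py : Prop := ∀ (u : String) (v : String) (parent : List (String × String)) (depth : List (String × Int)), Dom_reconstruct_odd_cycle_py u v parent depth → Spec_reconstruct_odd_cycle_py u v parent depth (reconstruct_odd_cycle_py u v parent depth)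

-- ===== LEMMAS AND PROOFS =====

-- the tail of the parent chain from c (c excluded), with fuel
def pvChain (parent : List (String × String)) : Nat → String → List String
  | 0, _ => []
  | fuel + 1, c =>
    match parent.lookup c with
    | some p => p :: pvChain parent fuel p
    | none => []

theorem pvAWalk_eq (parent : List (String × String)) :
    ∀ (f : Nat) (c : String) (acc : List String),
      pvAWalk parent f c acc =
        if (pvChain parent f c).length < f then some (acc ++ pvChain parent f c)
        else none := by
  intro f
  induction f with
  | zero => intro c acc; simp [pvAWalk, pvChain]
  | succ f ih =>
    intro c acc
    rw [pvAWalk, pvChain]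
    cases h : parent.lookup c with
    | none => simp
    | some p =>
      dsimp only
      rw [ih p (acc ++ [p])]
      by_cases hlt : (pvChain parent f p).length < f
      · simp [hlt, Nat.succ_lt_succ hlt]
      · simp [hlt]

theorem pvBWalk_eq (parent : List (String × String)) :
    ∀ (f : Nat) (c : String) (acc : List String),
      pvBWalk parent f (acc ++ [c]) =
        if (pvChain parent f c).length < f then some (acc ++ [c] ++ pvChain parent f c)
        else none := by
  intro f
  induction f with
  | zero => intro c acc; simp [pvBWalk, pvChain]
  | succ f ih =>
    intro c acc
    rw [pvBWalk, pvChain, PySem.List.pyGetD_neg_one_append_singleton]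
    cases h : parent.lookup c with
    | none => simp
    | some p =>
      dsimp only
      rw [show acc ++ [c] ++ [p] = (acc ++ [c]) ++ [p] from rfl, ih p (acc ++ [c])]
      by_cases hlt : (pvChain parent f p).length < f
      · simp [hlt, Nat.succ_lt_succ hlt]
      · simp [hlt]

-- completeness: a full parent chain (consecutive lookups, ending where lookup fails)
inductive pvComplete (parent : List (String × String)) : List String → Prop
  | single (x : String) : parent.lookup x = none → pvComplete parent [x]
  | cons (x y : String) (l : List String) : parent.lookup x = some y →
      pvComplete parent (y :: l) → pvComplete parent (x :: y :: l)

theorem pvChain_complete (parent : List (String × String)) :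
    ∀ (f : Nat) (x : String), (pvChain parent f x).length < f →
      pvComplete parent (x :: pvChain parent f x) := by
  intro f
  induction f with
  | zero => intro x h; omega
  | succ f ih =>
    intro x h
    rw [pvChain] at h ⊢
    cases hl : parent.lookup x with
    | none => exact pvComplete.single x hl
    | some p =>
      rw [hl] at h
      simp only [List.length_cons] at h
      exact pvComplete.cons x p _ hl (ih p (by omega))

theorem pvComplete_unique (parent : List (String × String)) :
    ∀ (l1 l2 : List String), pvComplete parent l1 → pvComplete parent l2 →
      l1.head? = l2.head? → l1 = l2 := by
  intro l1 l2 h1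
  induction h1 generalizing l2 with
  | single x hx =>
    intro h2 hh
    cases h2 with
    | single y hy =>
      simp only [List.head?_cons, Option.some.injEq] at hh
      rw [hh]
    | cons y z l hy _ =>
      simp only [List.head?_cons, Option.some.injEq] at hh
      subst hh
      rw [hy] at hx; cases hx
  | cons x y l hx _ ih =>
    intro h2 hh
    cases h2 with
    | single x' hx' =>
      simp only [List.head?_cons, Option.some.injEq] at hh
      subst hh
      rw [hx'] at hx; cases hx
    | cons x' y' l' hx' h2' =>
      simp only [List.head?_cons, Option.some.injEq] at hh
      subst hh
      have hy : y = y' := Option.some.inj (hx.symm.trans hx')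
      subst hy
      rw [ih (y :: l') h2' rfl]

theorem pvComplete_drop (parent : List (String × String)) :
    ∀ (i : Nat) (l : List String), pvComplete parent l → i < l.length →
      pvComplete parent (l.drop i) := by
  intro i
  induction i with
  | zero => intro l h _; simpa using h
  | succ i ih =>
    intro l h hi
    cases h with
    | single x hx => simp at hi
    | cons x y l' hx h' =>
      rw [List.drop_succ_cons]
      exact ih (y :: l') h' (by simpa using Nat.lt_of_succ_lt_succ hi)

-- the functional-graph fact: two complete chains coincide from any common element on
theorem pvDrop_eq_of_common (parent : List (String × String)) (l1 l2 : List String)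
    (h1 : pvComplete parent l1) (h2 : pvComplete parent l2)
    (i j : Nat) (hi : i < l1.length) (hj : j < l2.length)
    (he : l1[i] = l2[j]) : l1.drop i = l2.drop j := by
  apply pvComplete_unique parent _ _ (pvComplete_drop parent i l1 h1 hi)
    (pvComplete_drop parent j l2 h2 hj)
  rw [List.head?_drop, List.head?_drop, List.getElem?_eq_getElem hi,
    List.getElem?_eq_getElem hj, he]

theorem pvComplete_nodup (parent : List (String × String)) (l : List String)
    (h : pvComplete parent l) : l.Nodup := by
  rw [List.nodup_iff_injective_getElem]
  intro a b hab
  have := pvDrop_eq_of_common parent l l h h a b a.2 b.2 hab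
  have hlen := congrArg List.length this
  simp only [List.length_drop] at hlen
  exact Fin.eq_of_val_eq (by omega)

-- pvBCpl: bounds, prefix agreement, maximality
theorem pvBCpl_le : ∀ (a b : List String), pvBCpl a b ≤ a.length ∧ pvBCpl a b ≤ b.length := by
  intro a
  induction a with
  | nil => intro b; cases b <;> simp [pvBCpl]
  | cons x xs ih =>
    intro b
    cases b with
    | nil => simp [pvBCpl]
    | cons y ys =>
      rw [pvBCpl]
      by_cases h : x = y
      · simp only [h, if_true, List.length_cons]
        have := ih ys
        omega
      · simp [h]

theorem pvBCpl_take : ∀ (a b : List String), a.take (pvBCpl a b) = b.take (pvBCpl a b) := by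
  intro a
  induction a with
  | nil => intro b; cases b <;> simp [pvBCpl]
  | cons x xs ih =>
    intro b
    cases b with
    | nil => simp [pvBCpl]
    | cons y ys =>
      rw [pvBCpl]
      by_cases h : x = y
      · simp only [h, if_true, List.take_succ_cons]
        rw [ih ys]
      · simp [h]

theorem pvBCpl_ge : ∀ (a b : List String) (n : Nat), n ≤ a.length → n ≤ b.length →
    a.take n = b.take n → n ≤ pvBCpl a b := by
  intro a
  induction a with
  | nil => intro b n ha _ _; simp only [List.length_nil] at ha; omega
  | cons x xs ih =>
    intro b n ha hb ht
    cases n with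
    | zero => omega
    | succ n =>
      cases b with
      | nil => simp at hb
      | cons y ys =>
        simp only [List.take_succ_cons, List.cons.injEq] at ht
        rw [pvBCpl, if_pos ht.1]
        have := ih ys n (by simpa using ha) (by simpa using hb) ht.2
        omega

-- first element of pv that occurs in pu (with its index), mirrors A's scan
def pvFirstMem (pu : List String) : List String → Option (String × Nat)
  | [] => none
  | n :: t => if n ∈ pu then some (n, 0) else (pvFirstMem pu t).map (fun q => (q.1, q.2 + 1))

theorem pvSetPu_contains (pu : List String) :
    ∀ n, ((PySem.List.enumerate pu 0).foldl (fun d p => d.insert p.2 p.1) PySem.Dict.empty).contains n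
      = decide (n ∈ pu) := by
  intro n
  rw [PySem.Dict.contains_eq_decide_mem_keys]
  rw [PySem.Dict.keys_foldl_insert_key (key := Prod.snd) (f := fun d p => p.1)]
  simp [PySem.List.map_snd_enumerate, PySem.Dict.keys_empty]

theorem pvAScan_eq (pu pv : List String) (d : PySem.Dict String Int)
    (hd : ∀ n, d.contains n = decide (n ∈ pu)) :
    ∀ s : Int, pvAScan d (PySem.List.enumerate pv s) =
      (pvFirstMem pu pv).map (fun q => (q.1, s + (q.2 : Int))) := by
  induction pv with
  | nil => intro s; simp [pvAScan, pvFirstMem, PySem.List.enumerate]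
  | cons n t ih =>
    intro s
    rw [PySem.List.enumerate_cons, pvAScan, pvFirstMem, hd n]
    by_cases h : n ∈ pu
    · simp [h]
    · simp only [h, decide_false, if_false, Bool.false_eq_true]
      rw [ih (s + 1)]
      cases hfm : pvFirstMem pu t with
      | none => simp
      | some q =>
        simp only [Option.map_some]
        congr 1
        cases q with
        | mk x kk => simp; ring

theorem pvFirstMem_of_spec (pu : List String) :
    ∀ (pv : List String) (j : Nat) (hj : j < pv.length),
      pv[j] ∈ pu → (∀ j' (hj' : j' < j), pv[j']'(by omega) ∉ pu) →
      pvFirstMem pu pv = some (pv[j], j) := by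
  intro pv
  induction pv with
  | nil => intro j hj; simp at hj
  | cons n t ih =>
    intro j hj hmem hmin
    cases j with
    | zero =>
      simp only [List.getElem_cons_zero] at hmem ⊢
      rw [pvFirstMem, if_pos hmem]
    | succ j =>
      have hn : n ∉ pu := by
        have := hmin 0 (by omega)
        simpa using this
      rw [pvFirstMem, if_neg hn]
      rw [ih j (by simpa using Nat.lt_of_succ_lt_succ hj)
        (by simpa using hmem)
        (fun j' hj' => by
          have := hmin (j' + 1) (by omega)
          simpa using this)]
      simp

theorem pvFirstMem_none_of_disjoint (pu : List String) :
    ∀ (pv : List String), (∀ x ∈ pv, x ∉ pu) → pvFirstMem pu pv = none := by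
  intro pv
  induction pv with
  | nil => intro _; rfl
  | cons n t ih =>
    intro h
    rw [pvFirstMem, if_neg (h n (by simp))]
    rw [ih (fun x hx => h x (by simp [hx]))]
    rfl

-- the enumerate-fold dictionary is an index: on a Nodup list, getD at pu[i] is i
theorem pvSetPu_getD (pu : List String) (hnd : pu.Nodup) (i : Nat) (hi : i < pu.length) :
    ((PySem.List.enumerate pu 0).foldl (fun d p => d.insert p.2 p.1) PySem.Dict.empty).getD
      (pu[i]) 0 = (i : Int) := by
  have hitems : ((PySem.List.enumerate pu 0).foldl (fun d p => d.insert p.2 p.1)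
      PySem.Dict.empty).items = (PySem.List.enumerate pu 0).map (fun p => (p.2, p.1)) := by
    have := PySem.Dict.items_foldl_insert_fresh (l := PySem.List.enumerate pu 0)
      (k := Prod.snd) (v := Prod.fst) (d := PySem.Dict.empty)
      (by intro a _; simp [PySem.Dict.contains_empty])
      (by rw [PySem.List.map_snd_enumerate]; exact hnd)
    simpa using this
  apply PySem.Dict.getD_of_mem_items
  · rw [hitems]
    have : ((0 : Int) + (i : Int), pu[i]) ∈ PySem.List.enumerate pu 0 := by
      rw [PySem.List.mem_enumerate_iff]
      exact ⟨i, hi, rfl⟩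
    have hm := List.mem_map_of_mem (f := fun p : Int × String => (p.2, p.1)) this
    simpa using hm
  · exact PySem.Dict.nodup_keys_foldl_insert_key _ Prod.snd _ _ PySem.Dict.nodup_keys_empty

theorem pvDropLast_take {l : List String} {j : Nat} (h : j < l.length) :
    (l.take (j + 1)).dropLast = l.take j := by
  rcases Nat.lt_or_ge (j + 1) l.length with h' | h'
  · rw [List.dropLast_take h']
    simp
  · have hlen : l.length = j + 1 := by omega
    rw [List.take_of_length_le (by omega), List.dropLast_eq_take, hlen]
    simp

-- any pair of common positions bounds the common-suffix count from below
theorem pvCommon_le (parent : List (String × String)) (P Q : List String)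
    (hP : pvComplete parent P) (hQ : pvComplete parent Q)
    (i j : Nat) (hi : i < P.length) (hj : j < Q.length) (he : P[i] = Q[j]) :
    P.length - i ≤ pvBCpl P.reverse Q.reverse ∧ P.length - i = Q.length - j := by
  have hdrop := pvDrop_eq_of_common parent P Q hP hQ i j hi hj he
  have hlen : P.length - i = Q.length - j := by
    have := congrArg List.length hdrop
    simpa using this
  refine ⟨?_, hlen⟩
  apply pvBCpl_ge
  · simp only [List.length_reverse]; omega
  · simp only [List.length_reverse]; omega
  · rw [List.take_reverse, List.take_reverse,
      show P.length - (P.length - i) = i by omega,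
      show Q.length - (P.length - i) = j by omega, hdrop]

-- core, empty case: no common suffix means no common node at all
theorem pvMain_none (parent : List (String × String)) (P Q : List String)
    (hP : pvComplete parent P) (hQ : pvComplete parent Q)
    (hk0 : pvBCpl P.reverse Q.reverse = 0) : pvFirstMem P Q = none := by
  apply pvFirstMem_none_of_disjoint
  intro x hxQ hxP
  obtain ⟨j, hj, hxj⟩ := List.getElem_of_mem hxQ
  obtain ⟨i, hi, hxi⟩ := List.getElem_of_mem hxP
  have := (pvCommon_le parent P Q hP hQ i j hi hj (hxi.trans hxj.symm)).1
  omega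

-- core: A's first common node is exactly where B's common suffix starts
theorem pvMain_some (parent : List (String × String)) (P Q : List String)
    (hP : pvComplete parent P) (hQ : pvComplete parent Q)
    (k : Nat) (hk : k = pvBCpl P.reverse Q.reverse) (hk0 : k ≠ 0)
    (hkP : k ≤ P.length) (hkQ : k ≤ Q.length) :
    pvFirstMem P Q = some (Q[Q.length - k]'(by omega), Q.length - k) ∧
    P[P.length - k]'(by omega) = Q[Q.length - k]'(by omega) := by
  have htake := pvBCpl_take P.reverse Q.reverse
  rw [← hk] at htake
  have hsuffix : P.drop (P.length - k) = Q.drop (Q.length - k) := by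
    have := congrArg List.reverse htake
    rw [List.take_reverse, List.take_reverse] at this
    simpa using this
  have helem : P[P.length - k]'(by omega) = Q[Q.length - k]'(by omega) := by
    have h0 := congrArg (fun l => l[0]?) hsuffix
    simp only [List.getElem?_drop, Nat.add_zero] at h0
    rw [List.getElem?_eq_getElem (by omega), List.getElem?_eq_getElem (by omega)] at h0
    exact Option.some.inj h0
  refine ⟨?_, helem⟩
  apply pvFirstMem_of_spec
  · exact helem ▸ List.getElem_mem _
  · intro j' hj' hmem
    obtain ⟨i', hi', hxi'⟩ := List.getElem_of_mem hmem
    have hc := pvCommon_le parent P Q hP hQ i' j' hi' (by omega) hxi'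
    omega

-- ===== VERDICT (by name: the statement is the Claim_ definition above) =====
theorem reconstruct_odd_cycle_py_spec : Claim_equal_reconstruct_odd_cycle_py := by
  unfold Claim_equal_reconstruct_odd_cycle_py
  intro u v parent depth _hdom
  unfold Spec_reconstruct_odd_cycle_py
  set F := parent.length + 1 with hF
  set P := u :: pvChain parent F u with hPdef
  set Q := v :: pvChain parent F v with hQdef
  simp only [reconstruct_odd_cycle_py, reconstruct_odd_cycle_py_alt]
  rw [pvAWalk_eq parent F u [u], pvAWalk_eq parent F v [v]]
  rw [show ([u] : List String) = [] ++ [u] from rfl, show ([v] : List String) = [] ++ [v] from rfl,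
    pvBWalk_eq parent F u [], pvBWalk_eq parent F v []]
  by_cases hu : (pvChain parent F u).length < F
  case neg => simp [hu]
  case pos =>
  by_cases hv : (pvChain parent F v).length < F
  case neg => simp [hu, hv]
  case pos =>
  have hPc : pvComplete parent P := pvChain_complete parent F u hu
  have hQc : pvComplete parent Q := pvChain_complete parent F v hv
  have hPnd := pvComplete_nodup parent P hPc
  have hcont := pvSetPu_contains P
  have hscan := pvAScan_eq P Q _ hcont 0
  simp only [hu, hv, if_true, List.nil_append, List.singleton_append, ← hPdef, ← hQdef]
  set k := pvBCpl P.reverse Q.reverse with hk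
  by_cases hk0 : k = 0
  · rw [hscan, pvMain_none parent P Q hPc hQc (hk.symm.trans hk0), hk0]
    simp
  · have hkP : k ≤ P.length := by
      have := (pvBCpl_le P.reverse Q.reverse).1; simpa [← hk] using this
    have hkQ : k ≤ Q.length := by
      have := (pvBCpl_le P.reverse Q.reverse).2; simpa [← hk] using this
    obtain ⟨hfm, helem⟩ := pvMain_some parent P Q hPc hQc k hk hk0 hkP hkQ
    have hPpos : 0 < P.length := by simp [hPdef]
    have hQpos : 0 < Q.length := by simp [hQdef]
    rw [hscan, hfm]
    simp only [Option.map_some, if_neg hk0]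
    rw [zero_add]
    have hgetD := pvSetPu_getD P hPnd (P.length - k) (by omega)
    rw [helem] at hgetD
    rw [hgetD]
    rw [show ((P.length - k : Nat) : Int) + 1 = ((P.length - k + 1 : Nat) : Int) by push_cast; ring]
    rw [show ((Q.length - k : Nat) : Int) + 1 = ((Q.length - k + 1 : Nat) : Int) by push_cast; ring]
    rw [show (P.length : Int) - (k : Int) + 1 = ((P.length - k + 1 : Nat) : Int) by
      push_cast [Nat.cast_sub hkP]; ring]
    rw [show (Q.length : Int) - (k : Int) = ((Q.length - k : Nat) : Int) by
      push_cast [Nat.cast_sub hkQ]; ring]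
    rw [PySem.List.slice_to_natCast, PySem.List.slice_to_natCast, PySem.List.slice_to_natCast,
      PySem.List.slice_from_one, List.tail_reverse,
      pvDropLast_take (by omega : Q.length - k < Q.length)]
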